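-- pv_equiv track=rewrite | github.com/mesterhammerfic/ufc_odds | scraping_and_cleaning/src/__init__.py | clean_info_list
-- ===== SOURCE A (Python) =====
-- def clean_info_list(info_list):
--     """
--     input: info_list
--     output: info_list with no empty elements
--     """
--     new_list = [] #fields with no info do not have a colon followed by a new line, so i will take those out
--     for item in info_list:
--         if ':\n' in item:
--             new_list.append(item)
--     info_list = '\n'.join(new_list).split('\n')
--     clean_info_list = list(filter(lambda item: item != '', info_list))
--
--     return clean_info_list
-- ===== SOURCE B (Python) =====
-- def clean_info_list(info_list):
--     """
--     input: info_list
--     output: info_list with no empty elements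
--     """
--     out = []
--     for item in info_list:
--         if ':\n' not in item:
--             continue
--         buf = []
--         for ch in item:
--             if ch == '\n':
--                 if buf:
--                     out.append(''.join(buf))
--                 buf = []
--             else:
--                 buf.append(ch)
--         if buf:
--             out.append(''.join(buf))
--     return out
-- ===== Notes on version B (the rewrite author's own statement) =====
-- stated objective: alternative
-- what changed: Replaces A's filter / '\n'.join / split('\n') / filter pipeline by a character-level state machine: one loop over each kept item's characters with an explicit line buffer that is flushed (when nonempty) at every newline and at item end, so no join, split or second filtering pass occurs.
import Mathlib
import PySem

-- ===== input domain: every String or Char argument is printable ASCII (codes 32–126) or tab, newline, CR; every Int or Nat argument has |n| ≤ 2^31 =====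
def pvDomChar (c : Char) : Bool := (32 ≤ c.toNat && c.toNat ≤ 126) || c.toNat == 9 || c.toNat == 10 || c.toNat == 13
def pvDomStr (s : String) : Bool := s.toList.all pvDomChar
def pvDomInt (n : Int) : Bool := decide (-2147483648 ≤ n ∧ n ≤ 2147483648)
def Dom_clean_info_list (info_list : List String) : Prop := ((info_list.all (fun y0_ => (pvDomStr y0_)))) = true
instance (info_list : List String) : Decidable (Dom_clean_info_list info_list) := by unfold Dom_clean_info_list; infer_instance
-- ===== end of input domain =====

-- B replaces A's filter / '\n'.join / split('\n') / filter pipeline by a character-level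
-- state machine with an explicit line buffer (alternative decomposition, same cost).

-- ===== PORT A =====
def clean_info_list (info_list : List String) : List String :=
  let new_list : List String :=
    info_list.foldl (fun acc item => if PySem.Str.isIn ":\n" item then acc ++ [item] else acc) []
  let info_list' : List String :=
    (PySem.Chars.splitOn (PySem.Str.join "\n" new_list).toList "\n".toList).map String.ofList
  info_list'.filter (fun item => item ≠ "")

-- ===== PORT B =====
-- one character-level pass per kept item: flush the buffer at '\n' (if nonempty) and at item end
def clean_info_list_alt (info_list : List String) : List String :=
  info_list.foldl (fun out item =>
    if PySem.Str.isIn ":\n" item then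
      let fin := item.toList.foldl (fun (st : List String × List Char) ch =>
          if ch = '\n' then
            (if st.2 ≠ [] then st.1 ++ [String.ofList st.2] else st.1, [])
          else (st.1, st.2 ++ [ch])) (out, [])
      if fin.2 ≠ [] then fin.1 ++ [String.ofList fin.2] else fin.1
    else out) []

-- ===== PRECONDITION & SPEC =====
def Spec_clean_info_list (info_list : List String) (out : List String) : Prop := out = clean_info_list_alt info_list
instance (info_list : List String) (out : List String) : Decidable (Spec_clean_info_list info_list out) := by unfold Spec_clean_info_list; infer_instance

-- ===== CLAIM (what is proved, stated in full; the proofs are below) =====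
def Claim_equal_clean_info_list : Prop := ∀ (info_list : List String), Dom_clean_info_list info_list → Spec_clean_info_list info_list (clean_info_list info_list)

-- ===== LEMMAS AND PROOFS =====

/-- Structural single-character split, used only by the proofs. -/
def pvSplit (c : Char) : List Char → List (List Char)
  | [] => [[]]
  | d :: rest => if d = c then [] :: pvSplit c rest else (pvSplit c rest).modifyHead (d :: ·)

theorem pvSplit_ne_nil (c : Char) (l : List Char) : pvSplit c l ≠ [] := by
  induction l with
  | nil => simp [pvSplit]
  | cons d rest ih =>
    simp only [pvSplit]
    split_ifs
    · simp
    · intro h; exact ih (List.modifyHead_eq_nil_iff.mp h)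

theorem go_eq (c : Char) : ∀ (fuel : Nat) (l cur : List Char) (acc : List (List Char)),
    l.length ≤ fuel →
    PySem.Chars.splitOn.go [c] fuel l cur acc
      = acc.reverse ++ (pvSplit c l).modifyHead (cur.reverse ++ ·) := by
  intro fuel
  induction fuel with
  | zero =>
    intro l cur acc h
    have : l = [] := List.eq_nil_of_length_eq_zero (Nat.le_zero.mp h)
    subst this
    simp [PySem.Chars.splitOn.go, pvSplit]
  | succ n ih =>
    intro l cur acc h
    cases l with
    | nil => simp [PySem.Chars.splitOn.go, pvSplit]
    | cons d rest =>
      simp only [PySem.Chars.splitOn.go]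
      by_cases hdc : c = d
      · subst hdc
        have hp : [c].isPrefixOf (c :: rest) = true := by simp [List.isPrefixOf]
        rw [if_pos hp]
        have hrec := ih rest [] (cur.reverse :: acc) (Nat.le_of_succ_le_succ (by simpa using h))
        simp only [List.length_cons] at *
        simpa [pvSplit, hrec] using by
          cases hsp : pvSplit c rest with
          | nil => exact absurd hsp (pvSplit_ne_nil c rest)
          | cons x xs => simp
      · have hp : [c].isPrefixOf (d :: rest) = false := by
          simp [List.isPrefixOf]; intro hc; exact absurd hc hdc
        rw [if_neg (by simp [hp])]
        have hrec := ih rest (d :: cur) acc (Nat.le_of_succ_le_succ (by simpa using h))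
        rw [hrec]
        have hdc' : ¬ d = c := fun h' => hdc h'.symm
        simp only [pvSplit, if_neg hdc']
        cases hsp : pvSplit c rest with
        | nil => exact absurd hsp (pvSplit_ne_nil c rest)
        | cons x xs => simp

theorem splitOn_eq_pvSplit (c : Char) (l : List Char) :
    PySem.Chars.splitOn l [c] = pvSplit c l := by
  unfold PySem.Chars.splitOn
  rw [go_eq c (l.length + 1) l [] [] (Nat.le_succ _)]
  cases hsp : pvSplit c l with
  | nil => exact absurd hsp (pvSplit_ne_nil c l)
  | cons x xs => simp

theorem pvSplit_append (c : Char) (a b : List Char) :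
    pvSplit c (a ++ c :: b) = pvSplit c a ++ pvSplit c b := by
  induction a with
  | nil => simp [pvSplit]
  | cons d a' ih =>
    simp only [List.cons_append, pvSplit, ih]
    split_ifs
    · simp
    · cases hsp : pvSplit c a' with
      | nil => exact absurd hsp (pvSplit_ne_nil c a')
      | cons x xs => simp

theorem pvSplit_join (c : Char) (p : List Char) (ps : List (List Char)) :
    pvSplit c (PySem.Chars.join [c] (p :: ps)) = (p :: ps).flatMap (pvSplit c) := by
  induction ps generalizing p with
  | nil => simp [PySem.Chars.join, List.intercalate]
  | cons q qs ih =>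
    have hj : PySem.Chars.join [c] (p :: q :: qs) = p ++ c :: PySem.Chars.join [c] (q :: qs) := by
      simp [PySem.Chars.join, List.intercalate, List.intersperse]
    rw [hj, pvSplit_append, ih]
    simp [List.flatMap_cons]

theorem foldl_append_if_filter (p : String → Bool) (xs : List String) :
    ∀ (init : List String),
      xs.foldl (fun acc item => if p item then acc ++ [item] else acc) init
        = init ++ xs.filter p := by
  induction xs with
  | nil => intro init; simp
  | cons x xs ih =>
    intro init
    simp only [List.foldl_cons, List.filter_cons]
    by_cases hx : p x = true
    · rw [if_pos hx, ih, hx]; simp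
    · rw [if_neg hx, ih]; simp [hx]

theorem distrib_flatMap (xs : List String) :
    (((xs.map String.toList).flatMap (pvSplit '\n')).map String.ofList).filter
        (fun item => item ≠ "")
      = xs.flatMap (fun item =>
          ((pvSplit '\n' item.toList).map String.ofList).filter (fun line => line ≠ "")) := by
  induction xs with
  | nil => rfl
  | cons x xs ih =>
    simp only [List.map_cons, List.flatMap_cons, List.map_append, List.filter_append, ih]

/-- A's join/split/filter pipeline over the kept items, in terms of per-item `pvSplit`. -/
theorem join_split_key (xs : List String) :
    ((PySem.Chars.splitOn (PySem.Str.join "\n" xs).toList "\n".toList).map String.ofList).filter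
        (fun item => item ≠ "")
      = xs.flatMap (fun item =>
          ((pvSplit '\n' item.toList).map String.ofList).filter
            (fun line => line ≠ "")) := by
  have hsep : ("\n" : String).toList = ['\n'] := by decide
  simp only [hsep, splitOn_eq_pvSplit]
  cases xs with
  | nil => decide
  | cons q qs =>
    have hjoin : (PySem.Str.join "\n" (q :: qs)).toList
        = PySem.Chars.join ['\n'] (q.toList :: qs.map String.toList) := by
      simp [PySem.Str.join, hsep]
    rw [hjoin, pvSplit_join]
    exact distrib_flatMap (q :: qs)

theorem pvSplit_no_sep (c : Char) (l : List Char) (h : c ∉ l) : pvSplit c l = [l] := by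
  induction l with
  | nil => rfl
  | cons d rest ih =>
    have hd : ¬ d = c := fun h' => h (h' ▸ List.mem_cons_self)
    simp only [pvSplit, if_neg hd, ih (fun hm => h (List.mem_cons_of_mem d hm))]
    rfl

theorem ofList_ne_empty_iff (l : List Char) : (String.ofList l ≠ "") ↔ l ≠ [] := by
  constructor
  · intro h hl; exact h (by simp [hl])
  · intro hl h
    have : (String.ofList l).toList = ("" : String).toList := by rw [h]
    simp at this
    exact hl this

/-- B's inner character loop, finished by the final flush, equals filtered `pvSplit`. -/
theorem char_fold_key : ∀ (l : List Char) (out : List String) (buf : List Char), '\n' ∉ buf →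
    (let fin := l.foldl (fun (st : List String × List Char) ch =>
        if ch = '\n' then
          (if st.2 ≠ [] then st.1 ++ [String.ofList st.2] else st.1, [])
        else (st.1, st.2 ++ [ch])) (out, buf)
     if fin.2 ≠ [] then fin.1 ++ [String.ofList fin.2] else fin.1)
    = out ++ ((pvSplit '\n' (buf ++ l)).map String.ofList).filter (fun line => line ≠ "") := by
  intro l
  induction l with
  | nil =>
    intro out buf hb
    simp only [List.foldl_nil, List.append_nil]
    rw [pvSplit_no_sep '\n' buf hb]
    by_cases hbuf : buf = []
    · subst hbuf; simp
    · simp [hbuf, (ofList_ne_empty_iff buf).mpr hbuf]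
  | cons ch rest ih =>
    intro out buf hb
    simp only [List.foldl_cons]
    by_cases hch : ch = '\n'
    · subst hch
      simp only [if_true]
      have hsplit : pvSplit '\n' (buf ++ '\n' :: rest) = pvSplit '\n' buf ++ pvSplit '\n' rest := pvSplit_append '\n' buf rest
      rw [hsplit, pvSplit_no_sep '\n' buf hb]
      have ihc := ih (if buf ≠ [] then out ++ [String.ofList buf] else out) [] (by simp)
      simp only [List.nil_append] at ihc
      rw [ihc]
      by_cases hbuf : buf = []
      · subst hbuf; simp
      · rw [if_pos hbuf]
        simp [(ofList_ne_empty_iff buf).mpr hbuf]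
    · simp only [if_neg hch]
      have ihc := ih out (buf ++ [ch]) (by
        intro hm
        rcases List.mem_append.mp hm with h1 | h2
        · exact hb h1
        · exact hch ((List.mem_singleton.mp h2).symm))
      simp only [List.append_assoc, List.singleton_append] at ihc
      exact ihc

/-- B's outer loop pulls its accumulator out front. -/
theorem outer_fold_key (xs : List String) : ∀ (out : List String),
    xs.foldl (fun out item =>
      if PySem.Str.isIn ":\n" item then
        let fin := item.toList.foldl (fun (st : List String × List Char) ch =>
            if ch = '\n' then
              (if st.2 ≠ [] then st.1 ++ [String.ofList st.2] else st.1, [])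
            else (st.1, st.2 ++ [ch])) (out, [])
        if fin.2 ≠ [] then fin.1 ++ [String.ofList fin.2] else fin.1
      else out) out
    = out ++ (xs.filter (fun item => PySem.Str.isIn ":\n" item)).flatMap
        (fun item => ((pvSplit '\n' item.toList).map String.ofList).filter (fun line => line ≠ "")) := by
  induction xs with
  | nil => intro out; simp
  | cons x xs ih =>
    intro out
    simp only [List.foldl_cons, List.filter_cons]
    by_cases hx : PySem.Str.isIn ":\n" x = true
    · rw [if_pos hx, hx]
      have hkey := char_fold_key x.toList out [] (by simp)
      simp only [List.nil_append] at hkey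
      rw [hkey, ih]
      simp [List.flatMap_cons]
    · rw [if_neg hx]
      simp only [hx, Bool.false_eq_true, if_false]
      exact ih out

-- ===== VERDICT (by name: the statement is the Claim_ definition above) =====
theorem clean_info_list_spec : Claim_equal_clean_info_list := by
  intro info_list _
  unfold Spec_clean_info_list clean_info_list clean_info_list_alt
  rw [foldl_append_if_filter (fun item => PySem.Str.isIn ":\n" item) info_list [],
      List.nil_append, join_split_key, outer_fold_key info_list [], List.nil_append]
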